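-- pv_equiv track=rewrite | github.com/daniel-reich/ubiquitous-fiesta | n2y4i74e9mFdwHNCi_7.py | get_items_2
-- ===== SOURCE A (Python) =====
-- def get_items_2(arr,result,command=True):
--     if command == True:
--         result = [arr[-1]] + result
--         if len(arr) == 1: return result
--         return get_items_2(arr[0:-1],result,command=False)
--     elif command == False:
--         if len(arr) == 1: return result
--         return get_items_2(arr[0:-1],result,command=True)
-- ===== SOURCE B (Python) =====
-- def get_items_2(arr, result, command=True):
--     picked = []
--     take = command
--     for x in reversed(arr):
--         if take:
--             picked.append(x)
--         take = not take
--     return picked[::-1] + result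
-- ===== Notes on version B (the rewrite author's own statement) =====
-- stated objective: faster
-- what changed: Replaced A's O(n^2) recursion (which copies arr[0:-1] at every step and prepends to result) by a single O(n) pass over reversed(arr) with a take/skip toggle, building the picked prefix once.
import Mathlib
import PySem

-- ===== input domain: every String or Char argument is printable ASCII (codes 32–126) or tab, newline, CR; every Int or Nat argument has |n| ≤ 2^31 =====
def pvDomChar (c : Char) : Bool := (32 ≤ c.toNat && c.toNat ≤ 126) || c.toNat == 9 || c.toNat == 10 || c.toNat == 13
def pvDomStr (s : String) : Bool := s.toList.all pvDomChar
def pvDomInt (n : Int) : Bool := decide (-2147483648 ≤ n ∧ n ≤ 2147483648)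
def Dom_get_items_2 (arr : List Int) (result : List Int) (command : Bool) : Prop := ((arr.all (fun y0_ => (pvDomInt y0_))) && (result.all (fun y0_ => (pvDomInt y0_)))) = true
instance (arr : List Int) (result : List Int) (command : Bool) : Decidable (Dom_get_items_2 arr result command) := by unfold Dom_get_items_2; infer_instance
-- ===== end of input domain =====

-- B replaces A's O(n^2) recursion (copying arr[0:-1] each step) by one reverse pass with a
-- take/skip toggle; Pre_ excludes only arr = [], where A raises IndexError.

-- ===== PORT A =====
-- A's recursion: take arr[-1] when command, then recurse on arr[0:-1] flipping command.
-- Where Python raises IndexError (arr = [], command True: arr[-1]), the port returns [] (outside Pre_).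
def get_items_2 (arr : List Int) (result : List Int) (command : Bool) : List Int :=
  if command = true then
    match h : PySem.List.pyGet? arr (-1) with
    | none => []  -- Python: IndexError on arr[-1] (arr = [], excluded by Pre_)
    | some x =>
      let result := x :: result  -- [arr[-1]] + result
      if arr.length = 1 then result
      else get_items_2 (PySem.List.slice arr (some 0) (some (-1))) result false
  else
    if arr.length = 1 then result
    else get_items_2 (PySem.List.slice arr (some 0) (some (-1))) result true
termination_by 2 * arr.length + (if command then 0 else 1)
decreasing_by
  all_goals simp_wf
  · have hne : arr ≠ [] := by
      intro he; subst he; simp [PySem.List.pyGet?_neg_one] at h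
    have h1 : 1 ≤ arr.length := List.length_pos_iff.mpr hne
    simp only [PySem.List.slice_to_neg_one, List.length_dropLast]
    split_ifs <;> omega
  · simp only [PySem.List.slice_to_neg_one, List.length_dropLast]
    split_ifs <;> omega

-- ===== PORT B =====
-- Source B: one pass over reversed(arr) with a take/skip toggle, then picked[::-1] + result.
def get_items_2_alt (arr : List Int) (result : List Int) (command : Bool) : List Int :=
  let st := arr.reverse.foldl
    (fun (st : List Int × Bool) x => (if st.2 then st.1 ++ [x] else st.1, !st.2))
    ([], command)
  st.1.reverse ++ result

-- ===== PRECONDITION & SPEC =====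
-- Pre_ excludes only arr = [], where A raises IndexError.
def Pre_get_items_2 (arr : List Int) (result : List Int) (command : Bool) : Prop := arr ≠ []
instance (arr : List Int) (result : List Int) (command : Bool) : Decidable (Pre_get_items_2 arr result command) := by unfold Pre_get_items_2; infer_instance
def pvWitness_get_items_2 : List Int × List Int × Bool := ([1, 2, 3], [7], true)

def Spec_get_items_2 (arr : List Int) (result : List Int) (command : Bool) (out : List Int) : Prop := out = get_items_2_alt arr result command
instance (arr : List Int) (result : List Int) (command : Bool) (out : List Int) : Decidable (Spec_get_items_2 arr result command out) := by unfold Spec_get_items_2; infer_instance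

-- ===== CLAIM (what is proved, stated in full; the proofs are below) =====
def Claim_equal_get_items_2 : Prop := ∀ (arr : List Int) (result : List Int) (command : Bool), Dom_get_items_2 arr result command → Pre_get_items_2 arr result command → Spec_get_items_2 arr result command (get_items_2 arr result command)

-- ===== LEMMAS AND PROOFS =====

-- the take/skip selection B performs, position by position
def pvSel : List Int → Bool → List Int
  | [], _ => []
  | x :: r, true => x :: pvSel r false
  | _ :: r, false => pvSel r true

theorem pvSel_foldl (r : List Int) (acc : List Int) (t : Bool) :
    (r.foldl (fun (st : List Int × Bool) x => (if st.2 then st.1 ++ [x] else st.1, !st.2)) (acc, t)).1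
      = acc ++ pvSel r t := by
  induction r generalizing acc t with
  | nil => simp [pvSel]
  | cons x r ih =>
    cases t <;> simp [List.foldl_cons, ih, pvSel]

theorem alt_eq (arr result : List Int) (command : Bool) :
    get_items_2_alt arr result command = (pvSel arr.reverse command).reverse ++ result := by
  simp only [get_items_2_alt]
  rw [pvSel_foldl arr.reverse [] command]
  simp

theorem a_eq (arr : List Int) (h : arr ≠ []) :
    ∀ (result : List Int) (command : Bool),
      get_items_2 arr result command = (pvSel arr.reverse command).reverse ++ result := by
  induction arr using List.reverseRecOn with
  | nil => exact absurd rfl h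
  | append_singleton ys a ih =>
    intro result command
    cases command with
    | true =>
      rw [get_items_2]
      simp only [reduceIte]
      split
      · next hnone =>
          rw [PySem.List.pyGet?_neg_one_append_singleton] at hnone
          exact absurd hnone (by simp)
      · next x hsome =>
          rw [PySem.List.pyGet?_neg_one_append_singleton] at hsome
          obtain rfl : a = x := by injection hsome
          by_cases hy : ys = []
          · subst hy; simp [pvSel]
          · have h1 : 1 ≤ ys.length := List.length_pos_iff.mpr hy
            have hlen : ¬ (ys ++ [a]).length = 1 := by simp; omega
            simp only [hlen, if_false, PySem.List.slice_zero_start,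
              PySem.List.slice_to_neg_one, List.dropLast_concat]
            rw [ih hy]
            simp [pvSel]
    | false =>
      rw [get_items_2]
      by_cases hy : ys = []
      · subst hy; simp [pvSel]
      · have h1 : 1 ≤ ys.length := List.length_pos_iff.mpr hy
        have hlen : ¬ (ys ++ [a]).length = 1 := by simp; omega
        simp only [Bool.false_eq_true, if_false, hlen, PySem.List.slice_zero_start,
          PySem.List.slice_to_neg_one, List.dropLast_concat]
        rw [ih hy]
        simp [pvSel]

-- ===== VERDICT (by name: the statement is the Claim_ definition above) =====
theorem get_items_2_spec : Claim_equal_get_items_2 := by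
  intro arr result command _ hpre
  unfold Spec_get_items_2
  rw [a_eq arr hpre result command, alt_eq]
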